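-- pv_equiv track=rewrite | github.com/craig04/lintCode_Python | lintCode/lt_681_first_missing_prime.py | firstMissingPrime
-- ===== SOURCE A (Python) =====
-- def firstMissingPrime(nums):
--     nums = set(nums)
--     i = 2
--     primes = []
--     while True:
--         for p in primes:
--             if i % p == 0:
--                 break
--         else:
--             primes.append(i)
--             if i not in nums:
--                 return i
--         i += 1
-- ===== SOURCE B (Python) =====
-- def _is_prime(n):
--     d = 2
--     while d * d <= n:
--         if n % d == 0:
--             return False
--         d += 1
--     return True
--
--
-- def firstMissingPrime(nums):
--     s = set(nums)
--     i = 2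
--     while True:
--         if _is_prime(i) and i not in s:
--             return i
--         i += 1
-- ===== Notes on version B (the rewrite author's own statement) =====
-- stated objective: alternative
-- what changed: B tests each candidate's primality by trial division up to its square root instead of maintaining and scanning the growing list of all primes found so far, so no prime list is kept at all.
import Mathlib
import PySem

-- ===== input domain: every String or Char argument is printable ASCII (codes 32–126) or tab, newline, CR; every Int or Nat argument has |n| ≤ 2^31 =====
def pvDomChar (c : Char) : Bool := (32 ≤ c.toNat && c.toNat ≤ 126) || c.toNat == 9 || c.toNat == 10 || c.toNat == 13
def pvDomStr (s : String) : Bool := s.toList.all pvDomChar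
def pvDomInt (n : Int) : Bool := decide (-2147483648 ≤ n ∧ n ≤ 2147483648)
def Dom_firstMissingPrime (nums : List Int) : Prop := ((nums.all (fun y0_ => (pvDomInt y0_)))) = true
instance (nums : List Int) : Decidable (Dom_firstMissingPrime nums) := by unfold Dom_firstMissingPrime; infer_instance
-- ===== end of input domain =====

-- B tests each candidate by trial division up to √i instead of maintaining and scanning a list of all primes found so far.
-- Both whiles are ported with a fuel counter (2^33, enough for every input in Dom) as a totality guard.

-- ===== PORT A =====
-- 'while True' of A; the for/else over `primes` with break is List.any (no side effects in the for body).
def pvLoopA (s : PySem.Set Int) (primes : List Int) (i : Nat) : Nat → Int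
  | 0 => 0
  | fuel + 1 =>
    if primes.any (fun p => PySem.Int.mod (i : Int) p == 0) then
      pvLoopA s primes (i + 1) fuel
    else
      if PySem.Set.contains s (i : Int) then
        pvLoopA s (primes ++ [(i : Int)]) (i + 1) fuel
      else (i : Int)

def firstMissingPrime (nums : List Int) : Int :=
  pvLoopA (PySem.Set.ofList nums) [] 2 (2 ^ 33)

-- ===== PORT B =====
-- Source B's _is_prime: while d*d <= n, genuinely terminating.
def pvTrial (n d : Nat) : Bool :=
  if d * d ≤ n then
    (if n % d == 0 then false else pvTrial n (d + 1))
  else true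
termination_by n + 2 - d
decreasing_by
  have hd : d ≤ n + 1 := by
    rcases Nat.lt_or_ge d 2 with h2 | h2
    · omega
    · have := Nat.le_mul_of_pos_left d (show 0 < d by omega)
      omega
  omega

def pvLoopB (s : PySem.Set Int) (i : Nat) : Nat → Int
  | 0 => 0
  | fuel + 1 =>
    if pvTrial i 2 && !(PySem.Set.contains s (i : Int)) then (i : Int)
    else pvLoopB s (i + 1) fuel

def firstMissingPrime_alt (nums : List Int) : Int :=
  pvLoopB (PySem.Set.ofList nums) 2 (2 ^ 33)

-- ===== PRECONDITION & SPEC =====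
def Spec_firstMissingPrime (nums : List Int) (out : Int) : Prop := out = firstMissingPrime_alt nums
instance (nums : List Int) (out : Int) : Decidable (Spec_firstMissingPrime nums out) := by unfold Spec_firstMissingPrime; infer_instance

-- ===== CLAIM (what is proved, stated in full; the proofs are below) =====
def Claim_equal_firstMissingPrime : Prop := ∀ (nums : List Int), Dom_firstMissingPrime nums → Spec_firstMissingPrime nums (firstMissingPrime nums)

-- ===== LEMMAS AND PROOFS =====

-- A's `primes` holds exactly the primes below i (as Ints).
def pvInv (primes : List Int) (i : Nat) : Prop :=
  ∀ x : Int, x ∈ primes ↔ ∃ q : Nat, x = (q : Int) ∧ q.Prime ∧ q < i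

-- trial division from d upwards, assuming no divisor in [2, d) exists
theorem pvTrial_correct (n : Nat) : ∀ d : Nat, 2 ≤ d →
    (∀ m : Nat, 2 ≤ m → m < d → ¬ m ∣ n) →
    (pvTrial n d = true ↔ ∀ m : Nat, 2 ≤ m → m * m ≤ n → ¬ m ∣ n) := by
  intro d
  induction d using pvTrial.induct n with
  | case1 d hdd hmod =>
    intro hd2 hbelow
    rw [pvTrial, if_pos hdd, if_pos hmod]
    constructor
    · intro h; exact absurd h (by simp)
    · intro hall
      exact absurd (Nat.dvd_of_mod_eq_zero (by simpa using hmod)) (hall d hd2 hdd)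
  | case2 d hdd hmod ih =>
    intro hd2 hbelow
    rw [pvTrial, if_pos hdd, if_neg hmod]
    refine ih (by omega) ?_
    intro m hm2 hmd
    rcases Nat.lt_or_ge m d with h | h
    · exact hbelow m hm2 h
    · have hm : m = d := by omega
      subst hm
      intro hdvd
      exact hmod (by simpa using Nat.mod_eq_zero_of_dvd hdvd)
  | case3 d hdd =>
    intro hd2 hbelow
    rw [pvTrial, if_neg hdd]
    constructor
    · intro _ m hm2 hmm hdvd
      have hmd : m < d := by
        by_contra hge
        have hge' : d ≤ m := by omega
        have : d * d ≤ m * m := Nat.mul_le_mul hge' hge'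
        omega
      exact hbelow m hm2 hmd hdvd
    · intro _; rfl

theorem pvTrial_iff_prime (n : Nat) (hn : 2 ≤ n) : pvTrial n 2 = true ↔ n.Prime := by
  rw [pvTrial_correct n 2 le_rfl (by intro m h1 h2 _; omega)]
  constructor
  · intro h
    rw [Nat.prime_def_le_sqrt]
    exact ⟨hn, fun m hm2 hms => h m hm2 (Nat.le_sqrt.mp hms)⟩
  · intro hp m hm2 hmm hdvd
    rcases (Nat.Prime.eq_one_or_self_of_dvd hp m hdvd) with h | h
    · omega
    · subst h; nlinarith

theorem pvAny_eq (primes : List Int) (i : Nat) (hi : 2 ≤ i) (hinv : pvInv primes i) :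
    (primes.any (fun p => PySem.Int.mod (i : Int) p == 0)) = !decide (Nat.Prime i) := by
  by_cases hp : Nat.Prime i
  · simp only [hp, decide_true, Bool.not_true]
    rw [List.any_eq_false]
    intro x hx
    rcases (hinv x).1 hx with ⟨q, rfl, hq, hqi⟩
    simp only [beq_iff_eq, PySem.Int.mod_eq_zero_iff_dvd]
    intro hdvd
    have : q ∣ i := by exact_mod_cast hdvd
    rcases (Nat.Prime.eq_one_or_self_of_dvd hp q this) with h | h
    · exact absurd h (Nat.Prime.ne_one hq)
    · omega
  · simp only [hp, decide_false, Bool.not_false]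
    rw [List.any_eq_true]
    have h2 : i ≠ 1 := by omega
    have hmf : (Nat.minFac i).Prime := Nat.minFac_prime h2
    have hdvd : Nat.minFac i ∣ i := Nat.minFac_dvd i
    have hlt : Nat.minFac i < i := by
      rcases Nat.lt_or_ge (Nat.minFac i) i with h | h
      · exact h
      · have hle : Nat.minFac i ≤ i := Nat.le_of_dvd (by omega) hdvd
        have : Nat.minFac i = i := by omega
        rw [this] at hmf
        exact absurd hmf hp
    refine ⟨((Nat.minFac i : Nat) : Int), (hinv _).2 ⟨Nat.minFac i, rfl, hmf, hlt⟩, ?_⟩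
    simp only [beq_iff_eq, PySem.Int.mod_eq_zero_iff_dvd]
    exact_mod_cast hdvd

theorem pvLoop_eq (fuel : Nat) : ∀ (s : PySem.Set Int) (primes : List Int) (i : Nat),
    2 ≤ i → pvInv primes i → pvLoopA s primes i fuel = pvLoopB s i fuel := by
  induction fuel with
  | zero => intro s primes i _ _; rfl
  | succ fuel ih =>
    intro s primes i hi hinv
    rw [pvLoopA, pvLoopB, pvAny_eq primes i hi hinv]
    by_cases hp : Nat.Prime i
    · have htr : pvTrial i 2 = true := (pvTrial_iff_prime i hi).2 hp
      by_cases hc : (i : Int) ∈ s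
      · simp only [hp, decide_true, Bool.not_true, Bool.false_eq_true, if_false, htr,
          Bool.true_and, PySem.Set.contains_eq_listContains, List.contains_eq_mem, hc,
          decide_true, if_true, Bool.not_true, Bool.false_eq_true]
        refine ih s (primes ++ [(i : Int)]) (i + 1) (by omega) ?_
        intro x
        simp only [List.mem_append, List.mem_singleton, hinv x]
        constructor
        · rintro (⟨q, rfl, hq, hqi⟩ | rfl)
          · exact ⟨q, rfl, hq, by omega⟩
          · exact ⟨i, rfl, hp, by omega⟩
        · rintro ⟨q, rfl, hq, hqi⟩
          rcases Nat.lt_or_ge q i with h | h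
          · exact Or.inl ⟨q, rfl, hq, h⟩
          · have hqe : q = i := by omega
            subst hqe; exact Or.inr rfl
      · simp only [hp, decide_true, Bool.not_true, Bool.false_eq_true, if_false, htr,
          Bool.true_and, PySem.Set.contains_eq_listContains, List.contains_eq_mem, hc,
          decide_false, if_false, Bool.not_false, if_true]
    · have htr : pvTrial i 2 = false := by
        rcases Bool.eq_false_or_eq_true (pvTrial i 2) with h | h
        · exact absurd ((pvTrial_iff_prime i hi).1 h) hp
        · exact h
      simp only [hp, decide_false, Bool.not_false, if_true, htr, Bool.false_and,
        Bool.false_eq_true, if_false]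
      refine ih s primes (i + 1) (by omega) ?_
      intro x
      rw [hinv x]
      constructor
      · rintro ⟨q, rfl, hq, hqi⟩; exact ⟨q, rfl, hq, by omega⟩
      · rintro ⟨q, rfl, hq, hqi⟩
        rcases Nat.lt_or_ge q i with h | h
        · exact ⟨q, rfl, hq, h⟩
        · have hqe : q = i := by omega
          subst hqe; exact absurd hq hp

-- ===== VERDICT (by name: the statement is the Claim_ definition above) =====
theorem firstMissingPrime_spec : Claim_equal_firstMissingPrime := by
  intro nums _
  unfold Spec_firstMissingPrime firstMissingPrime firstMissingPrime_alt
  refine pvLoop_eq _ _ [] 2 le_rfl ?_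
  intro x
  simp only [List.not_mem_nil, false_iff]
  rintro ⟨q, rfl, hq, hqi⟩
  exact absurd hq.two_le (by omega)
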